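-- pv_equiv track=rewrite | github.com/draxxycodes/AgriCast-DLWTF | src/preprocess_clean.py | is_agricultural
-- ===== SOURCE A (Python) =====
-- AGRICULTURAL_COMMODITIES = [
--     # Grains & Cereals
--     'wheat', 'rice', 'maize', 'millet', 'sorghum', 'barley', 'corn',
--     'wheat flour', 'rice (low quality)', 'rice (high quality)', 'rice (imported)',
--     'maize (white)', 'maize (yellow)', 'maize flour',
--
--     # Legumes & Pulses
--     'beans', 'beans (dry)', 'lentils', 'peas', 'chickpeas', 'groundnuts',
--     'cowpeas', 'pigeon peas',
--
--     # Vegetables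
--     'potatoes', 'tomatoes', 'onions', 'cabbage', 'carrots', 'garlic',
--     'peppers', 'eggplant', 'spinach', 'cucumber', 'cauliflower',
--     'green beans', 'okra', 'pumpkin',
--
--     # Fruits
--     'bananas', 'apples', 'oranges', 'mangoes', 'grapes', 'papaya',
--
--     # Oils & Fats
--     'oil (vegetable)', 'oil (palm)', 'oil (sunflower)', 'oil (groundnut)',
--     'cooking oil', 'palm oil', 'vegetable oil', 'sunflower oil',
--
--     # Sugar & Sweeteners
--     'sugar', 'sugar (brown)', 'sugar (white)', 'honey',
--
--     # Dairy & Protein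
--     'milk', 'eggs', 'fish', 'meat', 'chicken', 'beef', 'goat',
--
--     # Other Food Items
--     'bread', 'pasta', 'cassava', 'yam', 'salt', 'tea', 'coffee',
--
--     # Generic categories
--     'food', 'vegetable', 'fruit', 'grain', 'cereal', 'pulse', 'legume'
-- ]
--
-- EXCLUDE_PATTERNS = [
--     'wage', 'fuel', 'diesel', 'petrol', 'gasoline', 'kerosene',
--     'exchange', 'rate', 'transport', 'rent', 'labour', 'labor',
--     'charcoal', 'firewood', 'electricity', 'water'
-- ]
--
-- def is_agricultural(commodity_name):
--     """Check if a commodity is agricultural based on name."""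
--     name_lower = commodity_name.lower().strip()
--
--     # Exclude non-agricultural items
--     for pattern in EXCLUDE_PATTERNS:
--         if pattern in name_lower:
--             return False
--
--     # Include known agricultural items
--     for agri_item in AGRICULTURAL_COMMODITIES:
--         if agri_item in name_lower or name_lower in agri_item:
--             return True
--
--     # Default: include if not explicitly excluded (conservative approach)
--     return True
-- ===== SOURCE B (Python) =====
-- EXCLUDE_PATTERNS = [
--     'wage', 'fuel', 'diesel', 'petrol', 'gasoline', 'kerosene',
--     'exchange', 'rate', 'transport', 'rent', 'labour', 'labor',
--     'charcoal', 'firewood', 'electricity', 'water'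
-- ]
--
-- def is_agricultural(commodity_name):
--     """Check if a commodity is agricultural based on name."""
--     s = commodity_name.lower().strip()
--     # scan each start position once; a blocked pattern must start at some position
--     for i in range(len(s) + 1):
--         if any(s.startswith(p, i) for p in EXCLUDE_PATTERNS):
--             return False
--     return True
-- ===== Notes on version B (the rewrite author's own statement) =====
-- stated objective: alternative
-- what changed: B replaces A's per-pattern substring searches (plus A's dead AGRICULTURAL_COMMODITIES scan, whose hit and fallthrough both return True) by a single positional scan over the normalized string that tests at each start position whether any exclude pattern begins there with a prefix check; the loop nesting is inverted and no substring-search primitive is used.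
import Mathlib
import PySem

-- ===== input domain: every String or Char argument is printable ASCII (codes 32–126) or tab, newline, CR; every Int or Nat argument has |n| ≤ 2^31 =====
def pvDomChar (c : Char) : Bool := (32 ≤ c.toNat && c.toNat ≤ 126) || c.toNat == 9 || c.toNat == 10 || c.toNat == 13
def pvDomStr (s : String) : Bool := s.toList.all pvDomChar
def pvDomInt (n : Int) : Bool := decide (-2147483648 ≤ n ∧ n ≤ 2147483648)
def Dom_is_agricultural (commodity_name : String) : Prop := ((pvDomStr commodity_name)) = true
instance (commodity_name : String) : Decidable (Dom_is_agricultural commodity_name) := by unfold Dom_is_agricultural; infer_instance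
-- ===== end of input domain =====

-- B replaces A's per-pattern substring searches (and drops A's dead AGRICULTURAL_COMMODITIES scan, whose hit and fallthrough both return True) by a single positional scan checking at each start position whether any exclude pattern begins there (prefix tests); alternative decomposition, same behaviour.


-- ===== PORT A =====
def AGRICULTURAL_COMMODITIES : List String := ["wheat", "rice", "maize", "millet", "sorghum", "barley", "corn", "wheat flour", "rice (low quality)", "rice (high quality)", "rice (imported)", "maize (white)", "maize (yellow)", "maize flour", "beans", "beans (dry)", "lentils", "peas", "chickpeas", "groundnuts", "cowpeas", "pigeon peas", "potatoes", "tomatoes", "onions", "cabbage", "carrots", "garlic", "peppers", "eggplant", "spinach", "cucumber", "cauliflower", "green beans", "okra", "pumpkin", "bananas", "apples", "oranges", "mangoes", "grapes", "papaya", "oil (vegetable)", "oil (palm)", "oil (sunflower)", "oil (groundnut)", "cooking oil", "palm oil", "vegetable oil", "sunflower oil", "sugar", "sugar (brown)", "sugar (white)", "honey", "milk", "eggs", "fish", "meat", "chicken", "beef", "goat", "bread", "pasta", "cassava", "yam", "salt", "tea", "coffee", "food", "vegetable", "fruit", "grain", "cereal", "pulse", "legume"]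

def EXCLUDE_PATTERNS : List String := ["wage", "fuel", "diesel", "petrol", "gasoline", "kerosene", "exchange", "rate", "transport", "rent", "labour", "labor", "charcoal", "firewood", "electricity", "water"]

-- 'for pattern in EXCLUDE_PATTERNS: if pattern in name_lower: return False'
def excludeLoop (name_lower : String) : List String → Bool
  | [] => true
  | pattern :: rest =>
    if PySem.Str.isIn pattern name_lower then false else excludeLoop name_lower rest

-- 'for agri_item in AGRICULTURAL_COMMODITIES: if agri_item in name_lower or name_lower in agri_item: return True'; fallthrough returns True
def agriLoop (name_lower : String) : List String → Bool
  | [] => true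
  | agri_item :: rest =>
    if PySem.Str.isIn agri_item name_lower || PySem.Str.isIn name_lower agri_item then true
    else agriLoop name_lower rest

def is_agricultural (commodity_name : String) : Bool :=
  let name_lower := PySem.Str.strip (PySem.Str.lower commodity_name)
  if excludeLoop name_lower EXCLUDE_PATTERNS = false then false
  else agriLoop name_lower AGRICULTURAL_COMMODITIES

-- ===== PORT B =====
-- 'for i in range(len(s)+1): if any(s.startswith(p, i) …): return False' — recursion over the
-- suffixes of s (each step is one position i; the [] case is i = len(s)); s.startswith(p, i) is
-- an exact prefix test of p against the suffix s[i:] for 0 ≤ i ≤ len(s).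
def scanSuffixes : List Char → Bool
  | [] => if EXCLUDE_PATTERNS.any (fun p => p.toList.isPrefixOf ([] : List Char)) then false else true
  | c :: t => if EXCLUDE_PATTERNS.any (fun p => p.toList.isPrefixOf (c :: t)) then false else scanSuffixes t

def is_agricultural_alt (commodity_name : String) : Bool :=
  let s := PySem.Str.strip (PySem.Str.lower commodity_name)
  scanSuffixes s.toList

-- ===== PRECONDITION & SPEC =====
def Spec_is_agricultural (commodity_name : String) (out : Bool) : Prop := out = is_agricultural_alt commodity_name
instance (commodity_name : String) (out : Bool) : Decidable (Spec_is_agricultural commodity_name out) := by unfold Spec_is_agricultural; infer_instance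

-- ===== CLAIM =====
def Claim_equal_is_agricultural : Prop := ∀ (commodity_name : String), Dom_is_agricultural commodity_name → Spec_is_agricultural commodity_name (is_agricultural commodity_name)

-- ===== LEMMAS AND PROOFS =====
theorem excludeLoop_eq_not_any (nl : String) (l : List String) :
    excludeLoop nl l = !(l.any (fun p => PySem.Str.isIn p nl)) := by
  induction l with
  | nil => rfl
  | cons p rest ih =>
    rw [List.any_cons]
    show (if PySem.Str.isIn p nl = true then false else excludeLoop nl rest) = _
    cases hp : PySem.Str.isIn p nl
    · rw [if_neg Bool.false_ne_true, ih, Bool.false_or]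
    · rw [if_pos rfl, Bool.true_or, Bool.not_true]

theorem agriLoop_eq_true (nl : String) (l : List String) : agriLoop nl l = true := by
  induction l with
  | nil => rfl
  | cons a rest ih => simp [agriLoop, ih]

theorem scanSuffixes_eq_false_iff (cs : List Char) :
    scanSuffixes cs = false ↔ ∃ p ∈ EXCLUDE_PATTERNS, ∃ j, p.toList <+: cs.drop j := by
  induction cs with
  | nil =>
    constructor
    · intro h
      by_cases ha : EXCLUDE_PATTERNS.any (fun p => p.toList.isPrefixOf ([] : List Char)) = true
      · rcases List.any_eq_true.mp ha with ⟨p, hp, hpre⟩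
        exact ⟨p, hp, 0, List.isPrefixOf_iff_prefix.mp hpre⟩
      · simp [scanSuffixes, ha] at h
    · rintro ⟨p, hp, j, hpre⟩
      have ha : EXCLUDE_PATTERNS.any (fun p => p.toList.isPrefixOf ([] : List Char)) = true :=
        List.any_eq_true.mpr ⟨p, hp, List.isPrefixOf_iff_prefix.mpr (by simpa using hpre)⟩
      simp [scanSuffixes, ha]
  | cons c t ih =>
    by_cases ha : EXCLUDE_PATTERNS.any (fun p => p.toList.isPrefixOf (c :: t)) = true
    · rcases List.any_eq_true.mp ha with ⟨p, hp, hpre⟩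
      simp only [scanSuffixes, ha, if_true, true_iff]
      exact ⟨p, hp, 0, by simpa using List.isPrefixOf_iff_prefix.mp hpre⟩
    · rw [show scanSuffixes (c :: t) = scanSuffixes t by simp [scanSuffixes, ha], ih]
      constructor
      · rintro ⟨p, hp, j, hpre⟩
        exact ⟨p, hp, j + 1, by simpa using hpre⟩
      · rintro ⟨p, hp, j, hpre⟩
        cases j with
        | zero =>
          exact absurd (List.any_eq_true.mpr
            ⟨p, hp, List.isPrefixOf_iff_prefix.mpr (by simpa using hpre)⟩) ha
        | succ j => exact ⟨p, hp, j, by simpa using hpre⟩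

theorem scanSuffixes_eq_not_any (cs : List Char) :
    scanSuffixes cs = !(EXCLUDE_PATTERNS.any (fun p => PySem.Chars.isIn p.toList cs)) := by
  by_cases h : EXCLUDE_PATTERNS.any (fun p => PySem.Chars.isIn p.toList cs) = true
  · rcases List.any_eq_true.mp h with ⟨p, hp, hin⟩
    rcases (PySem.Chars.exists_prefix_drop_iff_isIn p.toList cs).mpr hin with ⟨j, hj⟩
    rw [h, (scanSuffixes_eq_false_iff cs).mpr ⟨p, hp, j, hj⟩]; rfl
  · have h' : EXCLUDE_PATTERNS.any (fun p => PySem.Chars.isIn p.toList cs) = false :=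
      Bool.eq_false_iff.mpr h
    have hne : scanSuffixes cs ≠ false := by
      intro hf
      rcases (scanSuffixes_eq_false_iff cs).mp hf with ⟨p, hp, j, hj⟩
      have hin : PySem.Chars.isIn p.toList cs = true :=
        (PySem.Chars.exists_prefix_drop_iff_isIn p.toList cs).mp ⟨j, hj⟩
      exact absurd hin (by simpa using List.any_eq_false.mp h' p hp)
    rw [h', Bool.not_false]
    cases hsc : scanSuffixes cs
    · exact absurd hsc hne
    · rfl

-- ===== VERDICT =====
theorem is_agricultural_spec : Claim_equal_is_agricultural := by
  intro cn _
  unfold Spec_is_agricultural is_agricultural is_agricultural_alt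
  simp only [excludeLoop_eq_not_any, agriLoop_eq_true, scanSuffixes_eq_not_any,
    PySem.Str.isIn]
  split_ifs with h <;> simp_all
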